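-- pv_equiv track=rewrite | github.com/SuminoeRabbits/cloud_onehour | cloud_exec_para.py | order_instances_by_region
-- ===== SOURCE A (Python) =====
-- from typing import Dict, Any, Optional, Tuple, List, Callable
--
-- def order_instances_by_region(instances: List[Dict[str, Any]]) -> Tuple[List[Dict[str, Any]], List[str]]:
--     """
--     Reorder instances to enforce at least one instance per region first.
--
--     Returns:
--         (ordered_instances, regions)
--     """
--     region_map: Dict[str, List[Dict[str, Any]]] = {}
--     for inst in instances:
--         region = inst.get('region') or 'unknown-region'
--         region_map.setdefault(region, []).append(inst)
--
--     regions = list(region_map.keys())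
--     ordered: List[Dict[str, Any]] = []
--
--     # First pass: one per region
--     for region in regions:
--         bucket = region_map[region]
--         if bucket:
--             ordered.append(bucket.pop(0))
--
--     # Round-robin the rest to keep distribution
--     remaining = True
--     while remaining:
--         remaining = False
--         for region in regions:
--             bucket = region_map[region]
--             if bucket:
--                 ordered.append(bucket.pop(0))
--                 remaining = True
--
--     return ordered, regions
-- ===== SOURCE B (Python) =====
-- from itertools import zip_longest
-- from typing import Dict, Any, Tuple, List
--
--
-- def order_instances_by_region(instances: List[Dict[str, Any]]) -> Tuple[List[Dict[str, Any]], List[str]]: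
--     """
--     Reorder instances to enforce at least one instance per region first.
--
--     Returns:
--         (ordered_instances, regions)
--     """
--     region_map: Dict[str, List[Dict[str, Any]]] = {}
--     for inst in instances:
--         region = inst.get('region') or 'unknown-region'
--         region_map.setdefault(region, []).append(inst)
--
--     # Transpose the buckets: column 0 is one instance per region, column 1
--     # the second of each region, and so on -- exactly round-robin order.
--     ordered = [inst
--                for col in zip_longest(*region_map.values())
--                for inst in col
--                if inst is not None]
--     return ordered, list(region_map.keys())
-- ===== Notes on version B (the rewrite author's own statement) =====
-- stated objective: idiomatic
-- what changed: Replaces the destructive first-pass pop plus flag-driven while round-robin over the mutable region_map with a non-destructive transpose of the buckets (zip_longest over region_map.values(), flattened, None-fill dropped), which emits column 0 of every region, then column 1, etc.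
import Mathlib
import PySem

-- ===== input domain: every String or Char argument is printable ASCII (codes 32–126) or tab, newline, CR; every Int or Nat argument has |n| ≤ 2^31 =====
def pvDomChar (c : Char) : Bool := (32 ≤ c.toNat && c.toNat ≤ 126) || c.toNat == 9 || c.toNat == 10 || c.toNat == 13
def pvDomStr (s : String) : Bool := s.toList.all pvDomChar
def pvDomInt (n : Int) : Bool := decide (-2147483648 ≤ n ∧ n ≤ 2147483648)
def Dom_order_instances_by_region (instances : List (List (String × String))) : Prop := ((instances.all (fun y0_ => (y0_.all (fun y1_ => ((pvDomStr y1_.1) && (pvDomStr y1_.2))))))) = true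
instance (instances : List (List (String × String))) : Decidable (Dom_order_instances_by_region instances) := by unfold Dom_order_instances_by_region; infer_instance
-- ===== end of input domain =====

-- B replaces A's destructive first-pass pop + flag-driven while round-robin with a
-- non-destructive transpose of the buckets (zip_longest flattened); same return value.

-- ===== PORT A =====
-- inst.get('region') or 'unknown-region'  (falsy: missing key or empty string)
def pvRegionOf (inst : List (String × String)) : String :=
  match (PySem.Dict.ofList inst).get? "region" with
  | some r => if r = "" then "unknown-region" else r
  | none => "unknown-region"

-- the grouping loop (identical in A's and B's Python): region_map.setdefault(region, []).append(inst)
def pvGroup (instances : List (List (String × String))) :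
    PySem.Dict String (List (List (String × String))) :=
  instances.foldl (fun d inst => d.modify (pvRegionOf inst) [] (· ++ [inst])) PySem.Dict.empty

-- one step of A's first pass: if bucket: ordered.append(bucket.pop(0))
def pvStepA (st : List (List (String × String)) × PySem.Dict String (List (List (String × String))))
    (r : String) : List (List (String × String)) × PySem.Dict String (List (List (String × String))) :=
  match st.2.getD r [] with
  | [] => st
  | x :: rest => (st.1 ++ [x], st.2.insert r rest)

-- one step of the while-loop body (also sets the `remaining` flag)
def pvStepRR (st : List (List (String × String)) × (PySem.Dict String (List (List (String × String))) × Bool))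
    (r : String) : List (List (String × String)) × (PySem.Dict String (List (List (String × String))) × Bool) :=
  match st.2.1.getD r [] with
  | [] => st
  | x :: rest => (st.1 ++ [x], (st.2.1.insert r rest, true))

-- termination measure for the while loop
def pvMeasure (ks : List String) (d : PySem.Dict String (List (List (String × String)))) : Nat :=
  (ks.map (fun k => (d.getD k []).length)).sum


-- unfolding equations for the two step functions (cited by the proofs and termination)
theorem pvStepRR_nil (st : List (List (String × String)) × (PySem.Dict String (List (List (String × String))) × Bool))
    (r : String) (h : st.2.1.getD r [] = []) : pvStepRR st r = st := by
  unfold pvStepRR; rw [h]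

theorem pvStepRR_cons (st : List (List (String × String)) × (PySem.Dict String (List (List (String × String))) × Bool))
    (r : String) (x : List (String × String)) (rest : List (List (String × String)))
    (h : st.2.1.getD r [] = x :: rest) :
    pvStepRR st r = (st.1 ++ [x], (st.2.1.insert r rest, true)) := by
  unfold pvStepRR; rw [h]

-- every bucket length is non-increasing across a pass (used only for termination)
theorem pvPass_getD_le (ks : List String)
    (st : List (List (String × String)) × (PySem.Dict String (List (List (String × String))) × Bool))
    (k' : String) :
    ((ks.foldl pvStepRR st).2.1.getD k' []).length ≤ (st.2.1.getD k' []).length := by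
  induction ks generalizing st with
  | nil => simp
  | cons r ks ih =>
    simp only [List.foldl_cons]
    refine le_trans (ih _) ?_
    cases h : st.2.1.getD r [] with
    | nil => rw [pvStepRR_nil st r h]
    | cons x rest =>
      rw [pvStepRR_cons st r x rest h]
      by_cases hk : k' = r
      · subst hk; simp [PySem.Dict.getD_insert_self, h]
      · simp [PySem.Dict.getD_insert_of_ne _ _ _ hk]

theorem pvMeasure_mono (ks : List String) {d d' : PySem.Dict String (List (List (String × String)))}
    (h : ∀ k, ((d'.getD k []).length ≤ (d.getD k []).length)) :
    pvMeasure ks d' ≤ pvMeasure ks d :=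
  List.sum_le_sum (fun k _ => h k)

-- if a pass starting with remaining=False ends with remaining=True, the measure drops
theorem pvPass_lt (ks : List String)
    (st : List (List (String × String)) × (PySem.Dict String (List (List (String × String))) × Bool))
    (hb : st.2.2 = false) (h : (ks.foldl pvStepRR st).2.2 = true) :
    pvMeasure ks (ks.foldl pvStepRR st).2.1 < pvMeasure ks st.2.1 := by
  induction ks generalizing st with
  | nil => simp only [List.foldl_nil] at h; rw [hb] at h; exact absurd h (by simp)
  | cons r ks ih =>
    simp only [List.foldl_cons] at h ⊢
    cases hbuc : st.2.1.getD r [] with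
    | nil =>
      rw [pvStepRR_nil st r hbuc] at h ⊢
      have := ih st hb h
      have hle := pvPass_getD_le ks st r
      simp only [pvMeasure, List.map_cons, List.sum_cons] at *
      omega
    | cons x rest =>
      rw [pvStepRR_cons st r x rest hbuc] at h ⊢
      set st' : List (List (String × String)) × (PySem.Dict String (List (List (String × String))) × Bool) :=
        (st.1 ++ [x], (st.2.1.insert r rest, true)) with hst'
      have hpt : ∀ k, ((st'.2.1.getD k []).length ≤ (st.2.1.getD k []).length) := by
        intro k
        by_cases hk : k = r
        · subst hk; simp [hst', PySem.Dict.getD_insert_self, hbuc]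
        · simp [hst', PySem.Dict.getD_insert_of_ne _ _ _ hk]
      have h1 : ((ks.foldl pvStepRR st').2.1.getD r []).length < (st.2.1.getD r []).length := by
        have hle := pvPass_getD_le ks st' r
        have : ((ks.foldl pvStepRR st').2.1.getD r []).length ≤ rest.length := by
          simpa [hst', PySem.Dict.getD_insert_self] using hle
        simp [hbuc]; omega
      have h2 : pvMeasure ks (ks.foldl pvStepRR st').2.1 ≤ pvMeasure ks st.2.1 := by
        exact le_trans (pvMeasure_mono ks (fun k => pvPass_getD_le ks st' k)) (pvMeasure_mono ks hpt)
      simp only [pvMeasure, List.map_cons, List.sum_cons] at *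
      omega

-- the while loop: repeat the pass while `remaining` was set
def pvRRLoop (regions : List String) (ordered : List (List (String × String)))
    (d : PySem.Dict String (List (List (String × String)))) : List (List (String × String)) :=
  if h : (regions.foldl pvStepRR (ordered, (d, false))).2.2 = true then
    pvRRLoop regions (regions.foldl pvStepRR (ordered, (d, false))).1
      (regions.foldl pvStepRR (ordered, (d, false))).2.1
  else (regions.foldl pvStepRR (ordered, (d, false))).1
termination_by pvMeasure regions d
decreasing_by
  simp only [List.foldl_subtype, List.unattach_attach]
  exact pvPass_lt regions (ordered, (d, false)) rfl h

def order_instances_by_region (instances : List (List (String × String))) :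
    (List (List (String × String))) × List String :=
  let d := pvGroup instances
  let regions := d.keys
  let st := regions.foldl pvStepA ([], d)
  (pvRRLoop regions st.1 st.2, regions)

-- ===== PORT B =====
-- ordered = [inst for col in zip_longest(*region_map.values()) for inst in col if inst is not None]
-- each zip_longest column contributes the heads of the still-nonempty buckets (None-fill dropped)
theorem pvTranspose_measure (bss : List (List (List (String × String))))
    (h : ¬ bss.all List.isEmpty = true) :
    ((bss.map List.tail).map List.length).sum < (bss.map List.length).sum := by
  rw [List.map_map]
  obtain ⟨b, hb, hne⟩ : ∃ b ∈ bss, ¬ b.isEmpty = true := by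
    simpa using h
  exact List.sum_lt_sum _ _ (fun i _ => by cases i <;> simp)
    ⟨b, hb, by cases b <;> simp_all⟩

def pvTranspose (bss : List (List (List (String × String)))) : List (List (String × String)) :=
  if bss.all List.isEmpty then []
  else bss.filterMap List.head? ++ pvTranspose (bss.map List.tail)
termination_by (bss.map List.length).sum
decreasing_by
  rename_i h
  simp only [List.map_subtype, List.unattach_attach]
  exact pvTranspose_measure bss h

def order_instances_by_region_alt (instances : List (List (String × String))) :
    (List (List (String × String))) × List String :=
  let d := pvGroup instances
  (pvTranspose d.values, d.keys)

-- ===== PRECONDITION & SPEC =====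
def Spec_order_instances_by_region (instances : List (List (String × String))) (out : (List (List (String × String))) × List String) : Prop := out = order_instances_by_region_alt instances
instance (instances : List (List (String × String))) (out : (List (List (String × String))) × List String) : Decidable (Spec_order_instances_by_region instances out) := by unfold Spec_order_instances_by_region; infer_instance

-- ===== CLAIM (what is proved, stated in full; the proofs are below) =====
def Claim_equal_order_instances_by_region : Prop := ∀ (instances : List (List (String × String))), Dom_order_instances_by_region instances → Spec_order_instances_by_region instances (order_instances_by_region instances)

-- ===== LEMMAS AND PROOFS =====

theorem pvStepA_nil (st : List (List (String × String)) × PySem.Dict String (List (List (String × String))))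
    (r : String) (h : st.2.getD r [] = []) : pvStepA st r = st := by
  unfold pvStepA; rw [h]

theorem pvStepA_cons (st : List (List (String × String)) × PySem.Dict String (List (List (String × String))))
    (r : String) (x : List (String × String)) (rest : List (List (String × String)))
    (h : st.2.getD r [] = x :: rest) :
    pvStepA st r = (st.1 ++ [x], st.2.insert r rest) := by
  unfold pvStepA; rw [h]


-- first pass: collected heads
theorem pvFpA_fst (ks : List String) (hnd : ks.Nodup)
    (o : List (List (String × String))) (d : PySem.Dict String (List (List (String × String)))) :
    (ks.foldl pvStepA (o, d)).1 = o ++ ks.filterMap (fun k => (d.getD k []).head?) := by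
  induction ks generalizing o d with
  | nil => simp
  | cons r ks ih =>
    obtain ⟨hr, hnd'⟩ := List.nodup_cons.mp hnd
    simp only [List.foldl_cons, List.filterMap_cons]
    cases hbuc : d.getD r [] with
    | nil =>
      rw [pvStepA_nil (o, d) r hbuc]
      simp [ih hnd' o d]
    | cons x rest =>
      rw [pvStepA_cons (o, d) r x rest hbuc]
      simp only [List.head?_cons]
      rw [ih hnd' (o ++ [x]) (d.insert r rest)]
      have : ks.filterMap (fun k => ((d.insert r rest).getD k []).head?)
           = ks.filterMap (fun k => (d.getD k []).head?) := by
        apply List.filterMap_congr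
        intro k hk
        have hne : k ≠ r := fun he => hr (he ▸ hk)
        rw [PySem.Dict.getD_insert_of_ne _ _ _ hne]
      rw [this]; simp

-- first pass: resulting buckets
theorem pvFpA_getD' (ks : List String) (hnd : ks.Nodup)
    (o : List (List (String × String))) (d : PySem.Dict String (List (List (String × String)))) (k' : String) :
    (ks.foldl pvStepA (o, d)).2.getD k' [] =
      if k' ∈ ks then (d.getD k' []).tail else d.getD k' [] := by
  induction ks generalizing o d with
  | nil => simp
  | cons r ks ih =>
    obtain ⟨hr, hnd'⟩ := List.nodup_cons.mp hnd
    simp only [List.foldl_cons, List.mem_cons]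
    cases hbuc : d.getD r [] with
    | nil =>
      rw [pvStepA_nil (o, d) r hbuc]
      rw [ih hnd' o d]
      by_cases hk : k' = r
      · subst hk
        have : k' ∉ ks := hr
        simp [this, hbuc]
      · simp [hk]
    | cons x rest =>
      rw [pvStepA_cons (o, d) r x rest hbuc]
      rw [ih hnd' (o ++ [x]) (d.insert r rest)]
      by_cases hk : k' = r
      · subst hk
        have : k' ∉ ks := hr
        simp [this, PySem.Dict.getD_insert_self, hbuc]
      · rw [PySem.Dict.getD_insert_of_ne _ _ _ hk]
        simp [hk]

-- while-loop pass: collected heads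
theorem pvRR_fst (ks : List String) (hnd : ks.Nodup)
    (o : List (List (String × String))) (d : PySem.Dict String (List (List (String × String)))) (b : Bool) :
    (ks.foldl pvStepRR (o, (d, b))).1 = o ++ ks.filterMap (fun k => (d.getD k []).head?) := by
  induction ks generalizing o d b with
  | nil => simp
  | cons r ks ih =>
    obtain ⟨hr, hnd'⟩ := List.nodup_cons.mp hnd
    simp only [List.foldl_cons, List.filterMap_cons]
    cases hbuc : d.getD r [] with
    | nil =>
      rw [pvStepRR_nil (o, (d, b)) r hbuc]
      simp [ih hnd' o d b]
    | cons x rest =>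
      rw [pvStepRR_cons (o, (d, b)) r x rest hbuc]
      simp only [List.head?_cons]
      rw [ih hnd' (o ++ [x]) (d.insert r rest) true]
      have : ks.filterMap (fun k => ((d.insert r rest).getD k []).head?)
           = ks.filterMap (fun k => (d.getD k []).head?) := by
        apply List.filterMap_congr
        intro k hk
        have hne : k ≠ r := fun he => hr (he ▸ hk)
        rw [PySem.Dict.getD_insert_of_ne _ _ _ hne]
      rw [this]; simp

-- while-loop pass: resulting buckets
theorem pvRR_getD (ks : List String) (hnd : ks.Nodup)
    (o : List (List (String × String))) (d : PySem.Dict String (List (List (String × String)))) (b : Bool) (k' : String) :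
    (ks.foldl pvStepRR (o, (d, b))).2.1.getD k' [] =
      if k' ∈ ks then (d.getD k' []).tail else d.getD k' [] := by
  induction ks generalizing o d b with
  | nil => simp
  | cons r ks ih =>
    obtain ⟨hr, hnd'⟩ := List.nodup_cons.mp hnd
    simp only [List.foldl_cons, List.mem_cons]
    cases hbuc : d.getD r [] with
    | nil =>
      rw [pvStepRR_nil (o, (d, b)) r hbuc]
      rw [ih hnd' o d b]
      by_cases hk : k' = r
      · subst hk
        have : k' ∉ ks := hr
        simp [this, hbuc]
      · simp [hk]
    | cons x rest =>
      rw [pvStepRR_cons (o, (d, b)) r x rest hbuc]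
      rw [ih hnd' (o ++ [x]) (d.insert r rest) true]
      by_cases hk : k' = r
      · subst hk
        have : k' ∉ ks := hr
        simp [this, PySem.Dict.getD_insert_self, hbuc]
      · rw [PySem.Dict.getD_insert_of_ne _ _ _ hk]
        simp [hk]

-- while-loop pass: the `remaining` flag
theorem pvRR_flag (ks : List String) (hnd : ks.Nodup)
    (o : List (List (String × String))) (d : PySem.Dict String (List (List (String × String)))) (b : Bool) :
    (ks.foldl pvStepRR (o, (d, b))).2.2 =
      (b || ks.any (fun k => !(d.getD k []).isEmpty)) := by
  induction ks generalizing o d b with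
  | nil => simp
  | cons r ks ih =>
    obtain ⟨hr, hnd'⟩ := List.nodup_cons.mp hnd
    simp only [List.foldl_cons, List.any_cons]
    cases hbuc : d.getD r [] with
    | nil =>
      rw [pvStepRR_nil (o, (d, b)) r hbuc]
      simp [ih hnd' o d b]
    | cons x rest =>
      rw [pvStepRR_cons (o, (d, b)) r x rest hbuc]
      rw [ih hnd' (o ++ [x]) (d.insert r rest) true]
      have : ks.any (fun k => !((d.insert r rest).getD k []).isEmpty)
           = ks.any (fun k => !(d.getD k []).isEmpty) := by
        rw [Bool.eq_iff_iff, List.any_eq_true, List.any_eq_true]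
        constructor
        · rintro ⟨k, hk, hkp⟩
          have hne : k ≠ r := fun he => hr (he ▸ hk)
          exact ⟨k, hk, by rwa [PySem.Dict.getD_insert_of_ne _ _ _ hne] at hkp⟩
        · rintro ⟨k, hk, hkp⟩
          have hne : k ≠ r := fun he => hr (he ▸ hk)
          exact ⟨k, hk, by rwa [PySem.Dict.getD_insert_of_ne _ _ _ hne]⟩
      simp [this]

-- B's transpose satisfies its unfolding unconditionally
theorem pvTranspose_unfold (bss : List (List (List (String × String)))) :
    pvTranspose bss = bss.filterMap List.head? ++ pvTranspose (bss.map List.tail) := by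
  rw [pvTranspose.eq_def]
  by_cases h : bss.all List.isEmpty
  · simp only [h, if_true]
    have h1 : bss.filterMap List.head? = [] := by
      rw [List.filterMap_eq_nil_iff]
      intro b hb
      have := List.all_eq_true.mp h b hb
      cases b <;> simp_all
    have h2 : pvTranspose (bss.map List.tail) = [] := by
      rw [pvTranspose, if_pos]
      simp only [List.all_eq_true] at h ⊢
      intro b hb
      obtain ⟨c, hc, rfl⟩ := List.mem_map.mp hb
      have := h c hc
      cases c <;> simp_all
    rw [h1, h2]; rfl
  · simp [h]

-- the while loop equals (ordered so far) ++ transpose of the current buckets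
theorem pvRRLoop_eq (n : Nat) (ks : List String) (hnd : ks.Nodup)
    (o : List (List (String × String))) (d : PySem.Dict String (List (List (String × String))))
    (hm : pvMeasure ks d ≤ n) :
    pvRRLoop ks o d = o ++ pvTranspose (ks.map (fun k => d.getD k [])) := by
  induction n generalizing o d with
  | zero =>
    rw [pvRRLoop.eq_def]
    have hall : ∀ k ∈ ks, d.getD k [] = [] := by
      intro k hk
      have : (d.getD k []).length = 0 := by
        unfold pvMeasure at hm
        by_contra hne
        have : 1 ≤ (d.getD k []).length := by omega
        have := List.single_le_sum (l := ks.map (fun k => (d.getD k []).length)) (by simp) _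
          (List.mem_map.mpr ⟨k, hk, rfl⟩)
        omega
      exact List.length_eq_zero_iff.mp this
    have hflag : (ks.foldl pvStepRR (o, (d, false))).2.2 = false := by
      rw [pvRR_flag ks hnd o d false]
      simp only [Bool.false_or, List.any_eq_false]
      intro k hk; simp [hall k hk]
    simp only [hflag]
    simp only [Bool.false_eq_true, dite_false]
    rw [pvRR_fst ks hnd o d false]
    have h1 : ks.filterMap (fun k => (d.getD k []).head?) = [] := by
      rw [List.filterMap_eq_nil_iff]
      intro k hk; simp [hall k hk]
    have h2 : pvTranspose (ks.map (fun k => d.getD k [])) = [] := by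
      rw [pvTranspose, if_pos]
      simp only [List.all_eq_true]
      intro b hb
      obtain ⟨k, hk, rfl⟩ := List.mem_map.mp hb
      simp [hall k hk]
    rw [h1, h2]
  | succ n ih =>
    rw [pvRRLoop.eq_def]
    by_cases hflag : (ks.foldl pvStepRR (o, (d, false))).2.2 = true
    · simp only [hflag]
      simp only [dite_true]
      have hlt := pvPass_lt ks (o, (d, false)) rfl hflag
      have hgd : ∀ k', (ks.foldl pvStepRR (o, (d, false))).2.1.getD k' [] =
          if k' ∈ ks then (d.getD k' []).tail else d.getD k' [] := pvRR_getD ks hnd o d false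
      have hmeq : ks.map (fun k => (ks.foldl pvStepRR (o, (d, false))).2.1.getD k []) =
          (ks.map (fun k => d.getD k [])).map List.tail := by
        rw [List.map_map]
        apply List.map_congr_left
        intro k hk
        rw [hgd k]; simp [hk]
      have hlt' : pvMeasure ks (ks.foldl pvStepRR (o, (d, false))).2.1 < pvMeasure ks d := hlt
      rw [ih _ (ks.foldl pvStepRR (o, (d, false))).2.1 (by omega)]
      rw [pvRR_fst ks hnd o d false, hmeq]
      rw [pvTranspose_unfold (ks.map (fun k => d.getD k []))]
      rw [List.filterMap_map]
      simp [Function.comp]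
    · rw [dif_neg hflag]
      have hfalse : (ks.foldl pvStepRR (o, (d, false))).2.2 = false := by
        simpa using hflag
      have hany : ks.any (fun k => !(d.getD k []).isEmpty) = false := by
        have := pvRR_flag ks hnd o d false
        rw [hfalse] at this
        simpa using this.symm
      rw [pvRR_fst ks hnd o d false]
      have hall : ∀ k ∈ ks, d.getD k [] = [] := by
        intro k hk
        have := List.any_eq_false.mp hany k hk
        cases h : d.getD k [] <;> simp_all
      have h1 : ks.filterMap (fun k => (d.getD k []).head?) = [] := by
        rw [List.filterMap_eq_nil_iff]
        intro k hk; simp [hall k hk]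
      have h2 : pvTranspose (ks.map (fun k => d.getD k [])) = [] := by
        rw [pvTranspose, if_pos]
        simp only [List.all_eq_true]
        intro b hb
        obtain ⟨k, hk, rfl⟩ := List.mem_map.mp hb
        simp [hall k hk]
      rw [h1, h2]

theorem pvGroup_keys_nodup (instances : List (List (String × String))) :
    (pvGroup instances).keys.Nodup := by
  unfold pvGroup
  exact PySem.Dict.nodup_keys_foldl_modify_key instances pvRegionOf []
    (fun d x => (· ++ [x])) PySem.Dict.empty PySem.Dict.nodup_keys_empty

-- ===== VERDICT (by name: the statement is the Claim_ definition above) =====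
theorem order_instances_by_region_spec : Claim_equal_order_instances_by_region := by
  intro instances _
  unfold Spec_order_instances_by_region order_instances_by_region order_instances_by_region_alt
  set d := pvGroup instances with hd
  set ks := d.keys with hks
  have hnd : ks.Nodup := pvGroup_keys_nodup instances
  refine Prod.ext ?_ rfl
  show pvRRLoop ks (ks.foldl pvStepA ([], d)).1 (ks.foldl pvStepA ([], d)).2
      = pvTranspose d.values
  rw [pvRRLoop_eq (pvMeasure ks (ks.foldl pvStepA ([], d)).2) ks hnd _ _ le_rfl]
  rw [pvFpA_fst ks hnd [] d]
  have hmeq : ks.map (fun k => (ks.foldl pvStepA ([], d)).2.getD k []) =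
      (ks.map (fun k => d.getD k [])).map List.tail := by
    rw [List.map_map]
    apply List.map_congr_left
    intro k hk
    rw [pvFpA_getD' ks hnd [] d k]; simp [hk]
  rw [hmeq]
  rw [PySem.Dict.values_eq_map_keys d hnd []]
  rw [pvTranspose_unfold (ks.map (fun k => d.getD k []))]
  rw [List.filterMap_map]
  simp [Function.comp]
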